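-- pv_equiv track=rewrite | github.com/lunar-rv/lunar-rv | test.py | get_anomaly_bounds
-- ===== SOURCE A (Python) =====
-- prev_backlog_size = 93
--
-- end = 92
--
-- def get_anomaly_bounds(indices) -> list:
--     bounds = []
--     N = len(indices)
--     start_bound = None
--     for i in range(N):
--         this_value = indices[i]
--         if i == 0 or indices[i-1] + 1 != this_value:
--             start_bound = this_value - prev_backlog_size
--         if i+1 == N or indices[i+1] - 1 != this_value:
--             bounds.append((start_bound, this_value + end - prev_backlog_size - 1))
--     return bounds
-- ===== SOURCE B (Python) =====
-- prev_backlog_size = 93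
--
-- end = 92
--
-- def get_anomaly_bounds(indices) -> list:
--     if not indices:
--         return []
--     n = len(indices)
--     # positions where a new run starts, plus the two outer boundaries
--     cuts = [0] + [i for i in range(1, n) if indices[i] != indices[i - 1] + 1] + [n]
--     return [(indices[s] - prev_backlog_size,
--              indices[e - 1] + end - prev_backlog_size - 1)
--             for s, e in zip(cuts, cuts[1:])]
-- ===== Notes on version B (the rewrite author's own statement) =====
-- stated objective: alternative
-- what changed: Replaces A's single stateful boundary-detecting loop (carrying start_bound across iterations) by staged passes: first collect the break positions i where indices[i] != indices[i-1]+1 into a cut list [0, breaks..., n], then zip adjacent cuts and read each bound off by index as (indices[s]-prev_backlog_size, indices[e-1]+end-prev_backlog_size-1).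
import Mathlib
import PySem

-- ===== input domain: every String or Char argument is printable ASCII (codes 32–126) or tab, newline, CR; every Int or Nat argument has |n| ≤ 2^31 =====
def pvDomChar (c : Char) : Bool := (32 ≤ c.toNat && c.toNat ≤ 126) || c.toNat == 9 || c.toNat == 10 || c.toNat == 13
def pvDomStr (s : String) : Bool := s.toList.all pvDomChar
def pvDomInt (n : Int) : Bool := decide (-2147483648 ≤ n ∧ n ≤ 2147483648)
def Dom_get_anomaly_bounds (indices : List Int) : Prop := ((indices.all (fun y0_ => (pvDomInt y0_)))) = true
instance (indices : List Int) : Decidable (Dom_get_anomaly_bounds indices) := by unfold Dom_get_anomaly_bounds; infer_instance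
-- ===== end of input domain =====

-- B replaces A's stateful boundary-detecting loop by staged passes: first collect the break
-- POSITIONS, then zip adjacent cut positions and read the bounds off by index
-- (objective: alternative decomposition, not speed); same return value everywhere.

-- module globals
def prev_backlog_size : Int := 93
def end' : Int := 92

-- ===== PORT A =====
-- One loop iteration of A: i is the loop index; state = (start_bound, bounds).
-- indices[i] is always in range in A, so the `.getD 0` defaults are unreachable;
-- likewise start_bound is always set (i = 0 sets it) before it is appended.
def aStep (indices : List Int) (st : Option Int × List (Int × Int)) (i : Int) :
    Option Int × List (Int × Int) :=
  let this_value := (PySem.List.pyGet? indices i).getD 0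
  let start_bound :=
    if i = 0 ∨ (PySem.List.pyGet? indices (i - 1)).getD 0 + 1 ≠ this_value then
      some (this_value - prev_backlog_size)
    else st.1
  let bounds :=
    if i + 1 = (indices.length : Int) ∨
        (PySem.List.pyGet? indices (i + 1)).getD 0 - 1 ≠ this_value then
      st.2 ++ [(start_bound.getD 0, this_value + end' - prev_backlog_size - 1)]
    else st.2
  (start_bound, bounds)

def get_anomaly_bounds (indices : List Int) : List (Int × Int) :=
  ((PySem.List.pyRange 0 (indices.length) 1).foldl (aStep indices) (none, [])).2

-- ===== PORT B =====
-- comprehension condition: position i (1 ≤ i < n) starts a new run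
def isBreak (l : List Int) (i : Int) : Bool :=
  (PySem.List.pyGet? l i).getD 0 ≠ (PySem.List.pyGet? l (i - 1)).getD 0 + 1

-- comprehension body: a cut pair (s, e) mapped to its bound (indices[s] and indices[e-1]
-- are always in range for the produced cut pairs, so the `.getD 0` defaults are unreachable)
def pairBound (l : List Int) (se : Int × Int) : Int × Int :=
  ((PySem.List.pyGet? l se.1).getD 0 - prev_backlog_size,
   (PySem.List.pyGet? l (se.2 - 1)).getD 0 + end' - prev_backlog_size - 1)

def get_anomaly_bounds_alt (indices : List Int) : List (Int × Int) :=
  if indices = [] then []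
  else
    let cuts : List Int :=
      0 :: ((PySem.List.pyRange 1 (indices.length) 1).filter (isBreak indices)
            ++ [(indices.length : Int)])
    (cuts.zip cuts.tail).map (pairBound indices)

-- ===== PRECONDITION & SPEC =====
def Spec_get_anomaly_bounds (indices : List Int) (out : List (Int × Int)) : Prop := out = get_anomaly_bounds_alt indices
instance (indices : List Int) (out : List (Int × Int)) : Decidable (Spec_get_anomaly_bounds indices out) := by unfold Spec_get_anomaly_bounds; infer_instance

-- ===== CLAIM (what is proved, stated in full; the proofs are below) =====
def Claim_equal_get_anomaly_bounds : Prop := ∀ (indices : List Int), Dom_get_anomaly_bounds indices → Spec_get_anomaly_bounds indices (get_anomaly_bounds indices)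

-- ===== LEMMAS AND PROOFS =====

-- Common recursive characterisation: h start u rest = bounds of the suffix, with a run
-- currently open that started at value `start` and whose last element so far is `u`.
def h (start u : Int) : List Int → List (Int × Int)
  | [] => [(start - prev_backlog_size, u + end' - prev_backlog_size - 1)]
  | v :: xs =>
    if u + 1 = v then h start v xs
    else (start - prev_backlog_size, u + end' - prev_backlog_size - 1) :: h v v xs

-- A's loop, rephrased structurally on the remaining suffix (prev = value before it).
def g : List Int → Option Int → (Option Int × List (Int × Int)) → Option Int × List (Int × Int)
  | [], _, st => st
  | v :: rest, prev, st =>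
    let sb := if prev = none ∨ prev.getD 0 + 1 ≠ v then some (v - prev_backlog_size) else st.1
    let bs := if rest = [] ∨ rest.headD 0 - 1 ≠ v then
        st.2 ++ [(sb.getD 0, v + end' - prev_backlog_size - 1)]
      else st.2
    g rest (some v) (sb, bs)

lemma aStep_suffix (p : List Int) (v : Int) (s : List Int) (st : Option Int × List (Int × Int)) :
    aStep (p ++ v :: s) st (p.length : Int) =
      (let sb := if p.getLast? = none ∨ p.getLast?.getD 0 + 1 ≠ v then
          some (v - prev_backlog_size) else st.1
       let bs := if s = [] ∨ s.headD 0 - 1 ≠ v then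
          st.2 ++ [(sb.getD 0, v + end' - prev_backlog_size - 1)]
        else st.2
       (sb, bs)) := by
  have hthis : PySem.List.pyGet? (p ++ v :: s) ((p.length : Int)) = some v :=
    PySem.List.pyGet?_append_length p s v
  have hcond1 : ((p.length : Int) = 0 ∨
        (PySem.List.pyGet? (p ++ v :: s) ((p.length : Int) - 1)).getD 0 + 1 ≠ v) ↔
      (p.getLast? = none ∨ p.getLast?.getD 0 + 1 ≠ v) := by
    rcases List.eq_nil_or_concat p with hp | ⟨q, l, hp⟩
    · subst hp; simp
    · subst hp
      simp only [List.concat_eq_append]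
      have h2 : PySem.List.pyGet? ((q ++ [l]) ++ v :: s) (((q ++ [l]).length : Int) - 1)
          = some l := by
        have he : (q ++ [l]) ++ v :: s = q ++ (l :: v :: s) := by simp
        have hl : ((q ++ [l]).length : Int) - 1 = ((q.length : Int)) := by simp
        rw [he, hl]
        exact PySem.List.pyGet?_append_length q (v :: s) l
      rw [h2]
      simp
      omega
  have hcond2 : ((p.length : Int) + 1 = (((p ++ v :: s).length : Int)) ∨
        (PySem.List.pyGet? (p ++ v :: s) ((p.length : Int) + 1)).getD 0 - 1 ≠ v) ↔
      (s = [] ∨ s.headD 0 - 1 ≠ v) := by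
    cases s with
    | nil => simp
    | cons w s' =>
      have h2 : PySem.List.pyGet? (p ++ v :: w :: s') ((p.length : Int) + 1) = some w := by
        have he : p ++ v :: w :: s' = (p ++ [v]) ++ w :: s' := by simp
        have hl : ((p.length : Int)) + 1 = (((p ++ [v]).length : Int)) := by simp
        rw [he, hl]
        exact PySem.List.pyGet?_append_length (p ++ [v]) s' w
      rw [h2]
      simp
      omega
  unfold aStep
  simp only [hthis, Option.getD_some]
  rw [if_congr hcond1 rfl rfl, if_congr hcond2 rfl rfl]

lemma A_loop (s : List Int) : ∀ (p : List Int) (st : Option Int × List (Int × Int)),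
    (PySem.List.pyRange (p.length : Int) ((p ++ s).length : Int) 1).foldl (aStep (p ++ s)) st =
      g s p.getLast? st := by
  induction s with
  | nil =>
    intro p st
    rw [PySem.List.pyRange_one_eq_nil (by simp)]
    rfl
  | cons v s' ih =>
    intro p st
    have hlt : ((p.length : Int)) < (((p ++ v :: s').length : Int)) := by
      have hlen : (p ++ v :: s').length = p.length + (s'.length + 1) := by simp
      omega
    rw [PySem.List.pyRange_one_cons hlt, List.foldl_cons, aStep_suffix]
    have he : p ++ v :: s' = (p ++ [v]) ++ s' := by simp
    have hl : ((p.length : Int)) + 1 = (((p ++ [v]).length : Int)) := by simp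
    rw [he, hl, ih (p ++ [v])]
    simp only [List.getLast?_concat]
    rfl

lemma g_h (rest : List Int) : ∀ (v start : Int) (sb prev : Option Int) (acc : List (Int × Int)),
    ((prev = none ∨ prev.getD 0 + 1 ≠ v) ∧ start = v) ∨
      (prev = some (v - 1) ∧ sb = some (start - prev_backlog_size)) →
    (g (v :: rest) prev (sb, acc)).2 = acc ++ h start v rest := by
  induction rest with
  | nil =>
    intro v start sb prev acc hyp
    have hsb : (if prev = none ∨ prev.getD 0 + 1 ≠ v then some (v - prev_backlog_size) else sb)
        = some (start - prev_backlog_size) := by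
      rcases hyp with ⟨hc, hs⟩ | ⟨hp, hs⟩
      · rw [if_pos hc, hs]
      · rw [if_neg, hs]
        subst hp
        simp
    simp only [g, hsb]
    simp [h]
  | cons w r ih =>
    intro v start sb prev acc hyp
    have hsb : (if prev = none ∨ prev.getD 0 + 1 ≠ v then some (v - prev_backlog_size) else sb)
        = some (start - prev_backlog_size) := by
      rcases hyp with ⟨hc, hs⟩ | ⟨hp, hs⟩
      · rw [if_pos hc, hs]
      · rw [if_neg, hs]
        subst hp
        simp
    show (g (w :: r) (some v) _).2 = _
    simp only [hsb]
    by_cases cw : w = v + 1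
    · have hcond : ¬ (w :: r = [] ∨ (w :: r).headD 0 - 1 ≠ v) := by
        simp [cw]
      rw [if_neg hcond]
      rw [ih w start (some (start - prev_backlog_size)) (some v) acc
        (Or.inr ⟨by rw [cw]; norm_num, rfl⟩)]
      simp only [h]
      rw [if_pos cw.symm]
    · have hcond : (w :: r = [] ∨ (w :: r).headD 0 - 1 ≠ v) := by
        right; simp; omega
      rw [if_pos hcond]
      simp only [Option.getD_some]
      rw [ih w w (some (start - prev_backlog_size)) (some v)
        (acc ++ [(start - prev_backlog_size, v + end' - prev_backlog_size - 1)])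
        (Or.inl ⟨Or.inr (fun hh => cw hh.symm), rfl⟩)]
      simp only [h]
      rw [if_neg (fun hh => cw hh.symm)]
      simp

-- B's cut/zip/map pipeline, related to h: p is the processed prefix, u the value at
-- position p.length (last value of the currently open run), a the cut position where
-- that run started (holding the value `start`), s the remaining suffix.
lemma B_loop (s : List Int) : ∀ (p : List Int) (u a start : Int),
    PySem.List.pyGet? (p ++ u :: s) a = some start →
    (((a :: ((PySem.List.pyRange ((p.length : Int) + 1) (((p ++ u :: s).length : Int)) 1).filter
          (isBreak (p ++ u :: s)) ++ [((p ++ u :: s).length : Int)])).zip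
        ((PySem.List.pyRange ((p.length : Int) + 1) (((p ++ u :: s).length : Int)) 1).filter
          (isBreak (p ++ u :: s)) ++ [((p ++ u :: s).length : Int)])).map
      (pairBound (p ++ u :: s))) = h start u s := by
  induction s with
  | nil =>
    intro p u a start ha
    have hlen : (((p ++ u :: []).length : Int)) = (p.length : Int) + 1 := by simp
    rw [hlen, PySem.List.pyRange_one_eq_nil (le_refl _)]
    have hu : PySem.List.pyGet? (p ++ u :: []) ((p.length : Int) + 1 - 1) = some u := by
      have : ((p.length : Int) + 1 - 1) = (p.length : Int) := by omega
      rw [this]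
      exact PySem.List.pyGet?_append_length p [] u
    simp only [List.filter_nil, List.nil_append, List.zip_cons_cons, List.zip_nil_right,
      List.map_cons, List.map_nil, pairBound, ha, hu, Option.getD_some, h]
  | cons v s' ih =>
    intro p u a start ha
    have hsplit : p ++ u :: v :: s' = (p ++ [u]) ++ v :: s' := by simp
    have hv : PySem.List.pyGet? (p ++ u :: v :: s') ((p.length : Int) + 1) = some v := by
      rw [hsplit]
      have hl : ((p.length : Int)) + 1 = (((p ++ [u]).length : Int)) := by simp
      rw [hl]
      exact PySem.List.pyGet?_append_length (p ++ [u]) s' v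
    have hu : PySem.List.pyGet? (p ++ u :: v :: s') ((p.length : Int) + 1 - 1) = some u := by
      have : ((p.length : Int) + 1 - 1) = (p.length : Int) := by omega
      rw [this]
      exact PySem.List.pyGet?_append_length p (v :: s') u
    have hlt : ((p.length : Int)) + 1 < (((p ++ u :: v :: s').length : Int)) := by
      have : (p ++ u :: v :: s').length = p.length + (s'.length + 2) := by simp
      omega
    rw [PySem.List.pyRange_one_cons hlt, List.filter_cons]
    have hbreak : isBreak (p ++ u :: v :: s') ((p.length : Int) + 1) = decide (v ≠ u + 1) := by
      unfold isBreak
      rw [hv, hu]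
      simp
    have ihp := fun (a start : Int) (ha' : PySem.List.pyGet? (p ++ u :: v :: s') a = some start) => by
      have := ih (p ++ [u]) v a start (by rwa [← hsplit])
      have hL : (((p ++ [u]).length : Int) + 1) = (p.length : Int) + 1 + 1 := by simp
      rw [← hsplit, hL] at this
      exact this
    by_cases cb : v = u + 1
    · -- no break at this position: the run continues
      rw [hbreak]
      have : decide (v ≠ u + 1) = false := by simp [cb]
      rw [this]
      simp only [Bool.false_eq_true, if_false]
      rw [ihp a start ha]
      simp only [h]
      rw [if_pos cb.symm]
    · rw [hbreak]
      have : decide (v ≠ u + 1) = true := by simp [cb]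
      rw [this]
      simp only [if_true]
      -- zip (a :: c :: rest) (c :: rest) = (a, c) :: zip (c :: rest) rest
      simp only [List.cons_append, List.zip_cons_cons, List.map_cons]
      rw [ihp ((p.length : Int) + 1) v hv]
      simp only [pairBound, ha, hu, Option.getD_some, h]
      rw [if_neg (fun hh => cb hh.symm)]

-- ===== VERDICT (by name: the statement is the Claim_ definition above) =====
theorem get_anomaly_bounds_spec : Claim_equal_get_anomaly_bounds := by
  intro indices _
  unfold Spec_get_anomaly_bounds
  cases indices with
  | nil => rfl
  | cons v xs =>
    have hA : get_anomaly_bounds (v :: xs) = h v v xs := by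
      unfold get_anomaly_bounds
      have hloop := A_loop (v :: xs) [] (none, [])
      simp only [List.nil_append, List.length_nil, Nat.cast_zero] at hloop
      rw [hloop]
      have hg := g_h xs v v none none [] (Or.inl ⟨Or.inl rfl, rfl⟩)
      simp only [List.getLast?_nil]
      rw [hg]
      simp
    have hB : get_anomaly_bounds_alt (v :: xs) = h v v xs := by
      unfold get_anomaly_bounds_alt
      rw [if_neg (by simp)]
      have h0 : PySem.List.pyGet? (([] : List Int) ++ v :: xs) 0 = some v :=
        PySem.List.pyGet?_append_length ([] : List Int) xs v
      have := B_loop xs [] v 0 v h0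
      simp only [List.nil_append, List.length_nil, Nat.cast_zero, zero_add] at this
      simpa using this
    rw [hA, hB]
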